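-- pv_equiv track=rewrite | github.com/sharmaprakhar/rfc_miner | ocr_txt2SM/extractors_ver1/messageStructureExtractor.py | countWhites
-- ===== SOURCE A (Python) =====
-- def countWhites(line):
--   w=[]
--   for i in range(len(line)):
--     if line[i] == ' ':
--       if i != 0 and line[i-1] == ' ':
--         w[-1] += 1
--       else:
--         w.append(1)
--   return w
-- ===== SOURCE B (Python) =====
-- def countWhites(line):
--   out = []
--   run = 0
--   for ch in line:
--     if ch == ' ':
--       run += 1
--     else:
--       if run != 0:
--         out.append(run)
--         run = 0
--   if run != 0:
--     out.append(run)
--   return out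
-- ===== Notes on version B (the rewrite author's own statement) =====
-- stated objective: simpler
-- what changed: Replaces A's index-based loop that looks back at line[i-1] and mutates w[-1] with a single accumulator pass: a run counter is incremented on spaces and flushed to the output when a run ends (and once at the end), so there is no indexing, no look-back and no in-place list mutation.
import Mathlib
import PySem

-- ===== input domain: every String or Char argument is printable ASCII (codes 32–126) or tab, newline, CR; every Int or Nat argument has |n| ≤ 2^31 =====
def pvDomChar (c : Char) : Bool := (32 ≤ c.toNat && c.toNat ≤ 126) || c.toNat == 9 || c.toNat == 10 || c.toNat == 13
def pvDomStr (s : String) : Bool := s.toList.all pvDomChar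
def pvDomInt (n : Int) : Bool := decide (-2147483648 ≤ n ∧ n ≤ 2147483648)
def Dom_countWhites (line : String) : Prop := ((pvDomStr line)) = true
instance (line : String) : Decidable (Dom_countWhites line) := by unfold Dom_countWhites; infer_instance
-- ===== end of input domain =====

-- B replaces A's index loop with look-back (w[-1] += 1) by a run-counter accumulator pass; objective: simpler.

-- ===== PORT A =====
-- one iteration of A's loop body at index i (w[-1] += 1 = bump the last element;
-- the 'none' branch is unreachable in A: Python would raise IndexError there, but
-- whenever line[i-1] == ' ' the list w is nonempty)
def stepA (cs : List Char) (w : List Int) (i : Nat) : List Int :=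
  if cs[i]? = some ' ' then
    if i ≠ 0 ∧ cs[i-1]? = some ' ' then
      match w.getLast? with
      | some x => w.dropLast ++ [x + 1]
      | none => w
    else w ++ [1]
  else w

def countWhites (line : String) : List Int :=
  (List.range line.toList.length).foldl (stepA line.toList) []

-- ===== PORT B =====
-- one iteration of B's loop: state = (out, run)
def stepB (s : List Int × Int) (c : Char) : List Int × Int :=
  if c = ' ' then (s.1, s.2 + 1)
  else if s.2 ≠ 0 then (s.1 ++ [s.2], 0) else (s.1, 0)

def countWhites_alt (line : String) : List Int :=
  let s := line.toList.foldl stepB ([], 0)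
  if s.2 ≠ 0 then s.1 ++ [s.2] else s.1

-- ===== PRECONDITION & SPEC =====
def Spec_countWhites (line : String) (out : List Int) : Prop := out = countWhites_alt line
instance (line : String) (out : List Int) : Decidable (Spec_countWhites line out) := by unfold Spec_countWhites; infer_instance

-- ===== CLAIM (what is proved, stated in full; the proofs are below) =====
def Claim_equal_countWhites : Prop := ∀ (line : String), Dom_countWhites line → Spec_countWhites line (countWhites line)

-- ===== LEMMAS AND PROOFS =====

-- equation lemmas for the two step functions
theorem stepB_space (s : List Int × Int) : stepB s ' ' = (s.1, s.2 + 1) := by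
  simp [stepB]

theorem stepB_nonspace (s : List Int × Int) (c : Char) (hc : c ≠ ' ') :
    stepB s c = if s.2 ≠ 0 then (s.1 ++ [s.2], 0) else (s.1, 0) := by
  simp [stepB, hc]

theorem stepA_bump (cs : List Char) (w : List Int) (i : Nat)
    (h1 : cs[i]? = some ' ') (h2 : i ≠ 0 ∧ cs[i-1]? = some ' ') :
    stepA cs w i = match w.getLast? with
      | some x => w.dropLast ++ [x + 1]
      | none => w := by
  simp [stepA, h1, h2]

theorem stepA_new (cs : List Char) (w : List Int) (i : Nat)
    (h1 : cs[i]? = some ' ') (h2 : ¬ (i ≠ 0 ∧ cs[i-1]? = some ' ')) :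
    stepA cs w i = w ++ [1] := by
  simp [stepA, h1, h2]

theorem stepA_skip (cs : List Char) (w : List Int) (i : Nat)
    (h1 : cs[i]? ≠ some ' ') : stepA cs w i = w := by
  simp only [stepA, if_neg h1]

-- indices below cs.length read the same characters after a snoc
theorem stepA_snoc_lt (cs : List Char) (c : Char) (w : List Int) (i : Nat) (h : i < cs.length) :
    stepA (cs ++ [c]) w i = stepA cs w i := by
  unfold stepA
  rw [List.getElem?_append_left h]
  by_cases h0 : i = 0
  · subst h0; simp
  · rw [List.getElem?_append_left (by omega)]

-- the invariant relating A's fold to B's fold, proved by snoc induction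
theorem key (cs : List Char) :
    ((List.range cs.length).foldl (stepA cs) [] =
      (cs.foldl stepB ([], 0)).1 ++
        (if (cs.foldl stepB ([], 0)).2 ≠ 0 then [(cs.foldl stepB ([], 0)).2] else []))
    ∧ ((cs.foldl stepB ([], 0)).2 ≠ 0 ↔ cs.getLast? = some ' ')
    ∧ 0 ≤ (cs.foldl stepB ([], 0)).2 := by
  induction cs using List.reverseRecOn with
  | nil => simp
  | append_singleton cs c ih =>
    obtain ⟨hA, hiff, hnn⟩ := ih
    have hBfold : (cs ++ [c]).foldl stepB ([], 0) = stepB (cs.foldl stepB ([], 0)) c := by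
      rw [List.foldl_append, List.foldl_cons, List.foldl_nil]
    have hAfold : (List.range (cs ++ [c]).length).foldl (stepA (cs ++ [c])) [] =
        stepA (cs ++ [c]) ((List.range cs.length).foldl (stepA cs) []) cs.length := by
      rw [List.length_append, List.length_cons, List.length_nil, Nat.zero_add,
        List.range_succ, List.foldl_append, List.foldl_cons, List.foldl_nil]
      have hcong := PySem.List.foldl_congr_mem (l := List.range cs.length)
        (init := ([] : List Int)) (f := stepA (cs ++ [c])) (g := stepA cs)
        (fun acc x hx => stepA_snoc_lt cs c acc x (List.mem_range.mp hx))
      rw [hcong]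
    have hcs' : ((cs ++ [c])[cs.length]?) = some c := by
      rw [List.getElem?_append_right (le_refl _)]; simp
    rw [hBfold, hAfold, hA]
    by_cases hc : c = ' '
    · subst hc
      rw [stepB_space]
      by_cases hr : (cs.foldl stepB ([], 0)).2 ≠ 0
      · -- previous char is a space: A bumps w[-1], B increments run
        have hlast : cs.getLast? = some ' ' := hiff.mp hr
        have hne : cs ≠ [] := by intro h; rw [h] at hlast; simp at hlast
        have hlen0 : cs.length ≠ 0 := by simpa [List.length_eq_zero_iff] using hne
        have hprev : ((cs ++ [' '])[cs.length - 1]?) = some ' ' := by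
          rw [List.getElem?_append_left (by omega), ← List.getLast?_eq_getElem?]
          exact hlast
        rw [stepA_bump _ _ _ hcs' ⟨hlen0, hprev⟩]
        rw [if_pos hr, List.getLast?_concat, List.dropLast_concat]
        refine ⟨?_, ?_, by omega⟩
        · rw [if_pos (by simp; omega)]
        · simp; omega
      · -- run was 0: A appends 1, B starts a new run
        have hr0 : (cs.foldl stepB ([], 0)).2 = 0 := by omega
        have hnolast : cs.getLast? ≠ some ' ' := fun h => hr (hiff.mpr h)
        have hprevno : ¬ (cs.length ≠ 0 ∧ ((cs ++ [' '])[cs.length - 1]?) = some ' ') := by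
          rintro ⟨h0, hp⟩
          rw [List.getElem?_append_left (by omega), ← List.getLast?_eq_getElem?] at hp
          exact hnolast hp
        rw [stepA_new _ _ _ hcs' hprevno, hr0]
        refine ⟨?_, ?_, by omega⟩
        · simp
        · simp
    · -- non-space char: A leaves w untouched, B flushes the run
      rw [stepB_nonspace _ _ hc]
      rw [stepA_skip _ _ _ (by rw [hcs']; simp [hc])]
      by_cases hr : (cs.foldl stepB ([], 0)).2 ≠ 0
      · rw [if_pos hr, if_pos hr]
        refine ⟨by simp, ?_, by simp⟩
        simp [hc]
      · rw [if_neg hr, if_neg hr]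
        refine ⟨by simp, ?_, by simp⟩
        simp [hc]

-- ===== VERDICT (by name: the statement is the Claim_ definition above) =====
theorem countWhites_spec : Claim_equal_countWhites := by
  intro line _
  unfold Spec_countWhites countWhites countWhites_alt
  rw [(key line.toList).1]
  by_cases h : (line.toList.foldl stepB ([], 0)).2 ≠ 0 <;> simp [h]
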